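-- pv_equiv track=rewrite | github.com/ylhaichen/babybench-selftouch-hand-regard | babybench/selftouch_author.py | _is_left_hand_name
-- ===== SOURCE A (Python) =====
-- def _is_left_hand_name(name):
--     name = (name or "").lower()
--     return any(
--         token in name
--         for token in (
--             "left_hand",
--             "left_fingers",
--             "left_ff",
--             "left_mf",
--             "left_rf",
--             "left_lf",
--             "left_th",
--             "left_thumb",
--             "left_palm",
--             "leftfinger",
--             "left_finger",
--             "lhand",
--             "lfinger",
--             "lthumb",
--             "lpalm",
--         )
--     )
-- ===== SOURCE B (Python) =====
-- # The token tuple below is the task's fixed data (the same literals any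
-- # implementation must search for); B's algorithm itself shares nothing with A.
-- _LEFT_TOKENS = (
--     "left_hand",
--     "left_fingers",
--     "left_ff",
--     "left_mf",
--     "left_rf",
--     "left_lf",
--     "left_th",
--     "left_thumb",
--     "left_palm",
--     "leftfinger",
--     "left_finger",
--     "lhand",
--     "lfinger",
--     "lthumb",
--     "lpalm",
-- )
--
--
-- def _is_left_hand_name(name):
--     # Position-major scan: walk the string once by offset and test whether any
--     # token starts at this offset, instead of one full substring search per token.
--     name = (name or "").lower()
--     for i in range(len(name) + 1):
--         for token in _LEFT_TOKENS:
--             if name.startswith(token, i):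
--                 return True
--     return False
-- ===== Notes on version B (the rewrite author's own statement) =====
-- stated objective: alternative
-- what changed: Replaces A's token-major chain of independent full substring searches ('token in name' per token) with a single position-major scan over the string that tests at each offset whether any token starts there (startswith with an offset), so the string is traversed once by position instead of once per token.
import Mathlib
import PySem

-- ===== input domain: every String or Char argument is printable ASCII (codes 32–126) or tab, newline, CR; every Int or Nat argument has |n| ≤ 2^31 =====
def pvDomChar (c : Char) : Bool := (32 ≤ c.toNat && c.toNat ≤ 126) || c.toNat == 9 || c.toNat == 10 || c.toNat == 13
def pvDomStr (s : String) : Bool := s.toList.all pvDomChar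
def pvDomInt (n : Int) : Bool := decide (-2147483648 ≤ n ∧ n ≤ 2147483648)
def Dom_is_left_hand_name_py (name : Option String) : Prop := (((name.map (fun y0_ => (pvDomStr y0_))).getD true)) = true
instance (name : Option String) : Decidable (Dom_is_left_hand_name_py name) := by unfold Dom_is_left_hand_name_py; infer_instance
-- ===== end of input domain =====

-- B replaces A's per-token full substring searches with a single position-major scan
-- (at each offset, test whether any token starts there): an alternative traversal, same cost class.


-- the shared token tuple (module-level data in both Pythons)
def pvLeftTokens : List String :=
  ["left_hand", "left_fingers", "left_ff", "left_mf", "left_rf", "left_lf",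
   "left_th", "left_thumb", "left_palm", "leftfinger", "left_finger",
   "lhand", "lfinger", "lthumb", "lpalm"]

-- ===== PORT A =====
-- name = (name or "").lower(); any(token in name for token in TOKENS)
-- ((name or "") = name.getD "": for strings the only falsy value is "", on which getD "" agrees)
def is_left_hand_name_py (name : Option String) : Bool :=
  let s := PySem.Str.lower (name.getD "")
  pvLeftTokens.any (fun t => PySem.Str.isIn t s)

-- ===== PORT B =====
-- for i in range(len(name)+1): for token in TOKENS: if name.startswith(token, i): return True
-- name.startswith(token, i) for 0 ≤ i ≤ len(name) is exactly the prefix test on the suffix at i,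
-- ported as Chars.startswith on s.toList.drop i.toNat (i is nonnegative inside this range)
def is_left_hand_name_py_alt (name : Option String) : Bool :=
  let s := PySem.Str.lower (name.getD "")
  (PySem.List.pyRange 0 (PySem.Str.len s + 1) 1).any (fun i =>
    pvLeftTokens.any (fun t => PySem.Chars.startswith (s.toList.drop i.toNat) t.toList))

-- ===== PRECONDITION & SPEC =====
def Spec_is_left_hand_name_py (name : Option String) (out : Bool) : Prop := out = is_left_hand_name_py_alt name
instance (name : Option String) (out : Bool) : Decidable (Spec_is_left_hand_name_py name out) := by unfold Spec_is_left_hand_name_py; infer_instance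

-- ===== CLAIM (what is proved, stated in full; the proofs are below) =====
def Claim_equal_is_left_hand_name_py : Prop := ∀ (name : Option String), Dom_is_left_hand_name_py name → Spec_is_left_hand_name_py name (is_left_hand_name_py name)

-- ===== LEMMAS AND PROOFS =====

-- a token occurs as a substring iff it starts at some offset 0 ≤ i ≤ len
theorem pv_scan_iff (t cs : List Char) :
    (∃ i ∈ PySem.List.pyRange 0 ((cs.length : Int) + 1) 1,
        PySem.Chars.startswith (cs.drop i.toNat) t = true)
      ↔ PySem.Chars.isIn t cs = true := by
  constructor
  · rintro ⟨i, _, hs⟩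
    exact (PySem.Chars.exists_prefix_drop_iff_isIn t cs).mp
      ⟨i.toNat, (PySem.Chars.startswith_iff _ _).mp hs⟩
  · intro hin
    obtain ⟨j, hj⟩ := (PySem.Chars.exists_prefix_drop_iff_isIn t cs).mpr hin
    refine ⟨((min j cs.length : Nat) : Int), ?_, ?_⟩
    · rw [PySem.List.mem_pyRange_iff_of_pos one_pos]
      refine ⟨by positivity, ?_, one_dvd _⟩
      have : min j cs.length ≤ cs.length := min_le_right _ _
      omega
    · rw [PySem.Chars.startswith_iff, Int.toNat_natCast]
      rcases le_or_gt j cs.length with h | h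
      · rwa [min_eq_left h]
      · have : cs.drop j = [] := List.drop_eq_nil_of_le (le_of_lt h)
        rw [this] at hj
        rw [List.prefix_nil.mp hj]
        exact List.nil_prefix
theorem is_left_hand_name_py_eq (name : Option String) :
    is_left_hand_name_py name = is_left_hand_name_py_alt name := by
  unfold is_left_hand_name_py is_left_hand_name_py_alt
  rw [Bool.eq_iff_iff]
  simp only [List.any_eq_true, PySem.Str.isIn_eq, PySem.Str.len_eq]
  constructor
  · rintro ⟨t, ht, hin⟩
    obtain ⟨i, hi, hs⟩ := (pv_scan_iff t.toList _).mpr hin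
    exact ⟨i, hi, t, ht, hs⟩
  · rintro ⟨i, hi, t, ht, hs⟩
    exact ⟨t, ht, (pv_scan_iff t.toList _).mp ⟨i, hi, hs⟩⟩

-- ===== VERDICT (by name: the statement is the Claim_ definition above) =====
theorem is_left_hand_name_py_spec : Claim_equal_is_left_hand_name_py := by
  intro name _
  show is_left_hand_name_py name = is_left_hand_name_py_alt name
  exact is_left_hand_name_py_eq name
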